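-- pv_equiv track=rewrite | github.com/Adithyacharya/sample_repo | mmp_test_suites/accounts/test_accounts_TC34.py | has_ordered_subset
-- ===== SOURCE A (Python) =====
-- def has_ordered_subset(order_arr, input_list):
--     seen = set()
--     result = []
--     for item in input_list:
--         if item not in seen:
--             seen.add(item)
--             result.append(item)
--
--     subset_length = len(result)
--     for i in range(len(order_arr) - subset_length + 1):
--         if all(result[j] == order_arr[i + j] for j in range(subset_length)):
--             return True
--     return False
-- ===== SOURCE B (Python) =====
-- def has_ordered_subset(order_arr, input_list):
--     # The pattern (first occurrences of input_list) has pairwise-distinct elements,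
--     # so it has no proper border: KMP/MP matching degenerates to a single pass with a
--     # match-length counter that on mismatch restarts at 1 (if the current element is
--     # the pattern head) or 0.
--     p = list(dict.fromkeys(input_list))
--     m = len(p)
--     if m == 0:
--         return True
--     j = 0
--     for x in order_arr:
--         if x == p[j]:
--             j += 1
--             if j == m:
--                 return True
--         else:
--             j = 1 if x == p[0] else 0
--     return False
-- ===== Notes on version B (the rewrite author's own statement) =====
-- stated objective: alternative
-- what changed: B replaces A's scan of every start index with a single-pass KMP-style matcher: since the deduped pattern has distinct elements it has no proper border, so a match-length counter that restarts at 1 or 0 on a mismatch suffices.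
import Mathlib
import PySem

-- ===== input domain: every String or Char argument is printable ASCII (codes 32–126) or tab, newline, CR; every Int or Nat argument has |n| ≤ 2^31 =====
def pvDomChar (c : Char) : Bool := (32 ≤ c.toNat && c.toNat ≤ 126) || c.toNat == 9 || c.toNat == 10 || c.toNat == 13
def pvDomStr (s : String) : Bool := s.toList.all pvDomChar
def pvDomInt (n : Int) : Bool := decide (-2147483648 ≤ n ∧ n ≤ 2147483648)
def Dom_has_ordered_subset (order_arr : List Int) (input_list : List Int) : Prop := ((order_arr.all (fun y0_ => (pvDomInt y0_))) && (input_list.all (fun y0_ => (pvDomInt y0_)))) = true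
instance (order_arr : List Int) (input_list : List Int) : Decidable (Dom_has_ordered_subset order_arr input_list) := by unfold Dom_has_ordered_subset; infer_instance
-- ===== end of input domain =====

-- B: since the deduped pattern has pairwise-distinct elements it has no proper border, so a
-- single-pass KMP-style matcher (a match counter restarting at 1 or 0 on mismatch) replaces
-- A's scan of every start index (alternative algorithm; not measured faster).


-- ===== PORT A =====
-- literal port of A: build (seen, result) by the loop, then scan all start indices i and
-- compare element-wise with all(); result[j] / order_arr[i+j] are always in range in the
-- Python (0 ≤ j < len(result) and 0 ≤ i+j < len(order_arr)), so pyGetD with a default is exact here.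
def has_ordered_subset (order_arr : List Int) (input_list : List Int) : Bool :=
  let st := input_list.foldl
    (fun (acc : PySem.Set Int × List Int) item =>
      if PySem.Set.contains acc.1 item then acc
      else (PySem.Set.add acc.1 item, acc.2 ++ [item]))
    (PySem.Set.empty, [])
  let result := st.2
  let m : Int := PySem.List.len result
  (PySem.List.pyRange 0 (PySem.List.len order_arr - m + 1) 1).any (fun i =>
    (PySem.List.pyRange 0 m 1).all (fun j =>
      PySem.List.pyGetD result j 0 == PySem.List.pyGetD order_arr (i + j) 0))

-- ===== PORT B =====
-- port of Source B's for-loop over order_arr with the match counter j (0 ≤ j < m throughout, so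
-- p[j] and p[0] are always in range in the Python and pyGetD with a default is exact here).
def hosAux (p : List Int) (m : Int) (j : Int) : List Int → Bool
  | [] => false
  | x :: rest =>
    if x == PySem.List.pyGetD p j 0 then
      if j + 1 == m then true else hosAux p m (j + 1) rest
    else if x == PySem.List.pyGetD p 0 0 then hosAux p m 1 rest
    else hosAux p m 0 rest

-- p = list(dict.fromkeys(input_list)) is PySem.List.dedup; m == 0 returns True
def has_ordered_subset_alt (order_arr : List Int) (input_list : List Int) : Bool :=
  let p := PySem.List.dedup input_list
  let m : Int := PySem.List.len p
  if m == 0 then true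
  else hosAux p m 0 order_arr

-- ===== PRECONDITION & SPEC =====
def Spec_has_ordered_subset (order_arr : List Int) (input_list : List Int) (out : Bool) : Prop := out = has_ordered_subset_alt order_arr input_list
instance (order_arr : List Int) (input_list : List Int) (out : Bool) : Decidable (Spec_has_ordered_subset order_arr input_list out) := by unfold Spec_has_ordered_subset; infer_instance

-- ===== CLAIM (what is proved, stated in full; the proofs are below) =====
def Claim_equal_has_ordered_subset : Prop := ∀ (order_arr : List Int) (input_list : List Int), Dom_has_ordered_subset order_arr input_list → Spec_has_ordered_subset order_arr input_list (has_ordered_subset order_arr input_list)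

-- ===== LEMMAS AND PROOFS =====

-- the common specification both searches are proved equivalent to:
-- the pattern occurs as a contiguous block at some offset k
def Occ (p l : List Int) : Prop := ∃ k : Nat, k + p.length ≤ l.length ∧ (l.drop k).take p.length = p

-- extract one matched element from an occurrence
theorem occ_elem {L p : List Int} {k : Nat} (he : (L.drop k).take p.length = p)
    (i : Nat) (hi : i < p.length) (hL : k + i < L.length) : p[i] = L[k + i] := by
  have hq := congrArg (fun t => t[i]?) he
  simp only [List.getElem?_take, hi, if_pos, List.getElem?_drop,
    List.getElem?_eq_getElem hL, List.getElem?_eq_getElem hi] at hq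
  exact (Option.some_inj.mp hq).symm

-- A's accumulator pair keeps its two components equal, and the first is a Set.add fold
theorem hos_fold_pair (l : List Int) (s : List Int) :
    l.foldl (fun (acc : PySem.Set Int × List Int) item =>
      if PySem.Set.contains acc.1 item then acc
      else (PySem.Set.add acc.1 item, acc.2 ++ [item])) (s, s)
    = (l.foldl PySem.Set.add s, l.foldl PySem.Set.add s) := by
  induction l generalizing s with
  | nil => rfl
  | cons x xs ih =>
    simp only [List.foldl_cons]
    rcases h : PySem.Set.contains s x with _ | _
    · rw [PySem.Set.add_of_not_mem (by simpa [PySem.Set.contains_iff] using h)]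
      simpa [h] using ih (s ++ [x])
    · rw [PySem.Set.add_of_mem (by simpa [PySem.Set.contains_iff] using h)]
      simpa [h] using ih s

-- one candidate offset of A's inner all(), characterised element-wise
theorem hos_check_iff (ord p : List Int) (i : Int) (h0 : 0 ≤ i)
    (hub : i + (p.length : Int) ≤ (ord.length : Int)) :
    ((PySem.List.pyRange 0 (p.length : Int) 1).all (fun j =>
      PySem.List.pyGetD p j 0 == PySem.List.pyGetD ord (i + j) 0)) = true
    ↔ (ord.drop i.toNat).take p.length = p := by
  constructor
  · intro h
    apply List.ext_getElem
    · simp only [List.length_take, List.length_drop]; omega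
    · intro j hj1 hj2
      have hall := List.all_eq_true.mp h ((j : Nat) : Int)
        (by rw [PySem.List.mem_pyRange_one]; constructor <;> [positivity; exact_mod_cast hj2])
      rw [PySem.List.pyGetD_ofNat p j 0 hj2,
          PySem.List.pyGetD_eq_getElem ord 0 (by positivity) (by omega),
          beq_iff_eq] at hall
      simp only [show (i + ((j : Nat) : Int)).toNat = i.toNat + j from by omega] at hall
      simp only [List.getElem_take, List.getElem_drop]
      exact hall.symm
  · intro he
    apply List.all_eq_true.mpr
    intro jI hjI
    rw [PySem.List.mem_pyRange_one] at hjI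
    obtain ⟨hj0, hjm⟩ := hjI
    have hjm' : jI.toNat < p.length := by omega
    have hlt : i.toNat + jI.toNat < ord.length := by omega
    have h1 : PySem.List.pyGetD p jI 0 = p[jI.toNat] :=
      PySem.List.pyGetD_eq_getElem p 0 hj0 hjm
    have h2 : PySem.List.pyGetD ord (i + jI) 0 = ord[i.toNat + jI.toNat] := by
      rw [PySem.List.pyGetD_eq_getElem ord 0 (by omega) (by omega)]
      congr 1
      omega
    rw [h1, h2, beq_iff_eq]
    exact occ_elem he jI.toNat hjm' hlt

-- A's outer any() over start indices is exactly Occ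
theorem hos_search_iff_Occ (ord p : List Int) :
    ((PySem.List.pyRange 0 ((ord.length : Int) - (p.length : Int) + 1) 1).any (fun i =>
      (PySem.List.pyRange 0 (p.length : Int) 1).all (fun j =>
        PySem.List.pyGetD p j 0 == PySem.List.pyGetD ord (i + j) 0))) = true
    ↔ Occ p ord := by
  rw [List.any_eq_true]
  constructor
  · rintro ⟨i, hi, hall⟩
    rw [PySem.List.mem_pyRange_one] at hi
    obtain ⟨h0, h1⟩ := hi
    have hub : i + (p.length : Int) ≤ (ord.length : Int) := by omega
    exact ⟨i.toNat, by omega, (hos_check_iff ord p i h0 hub).mp hall⟩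
  · rintro ⟨k, hk, he⟩
    refine ⟨(k : Int), ?_, ?_⟩
    · rw [PySem.List.mem_pyRange_one]; exact ⟨by positivity, by omega⟩
    · exact (hos_check_iff ord p k (by positivity) (by omega)).mpr (by simpa using he)

-- after a mismatch x ≠ p[j] the partially-matched prefix p.take j contributes no
-- occurrence (distinct elements ⇒ no border), so the search restarts at x
theorem occ_shift (p : List Int) (hnd : p.Nodup) (j : Nat) (hj : j < p.length)
    (x : Int) (hx : x ≠ p[j]) (rest : List Int) :
    Occ p (p.take j ++ x :: rest) ↔ Occ p (x :: rest) := by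
  have hTlen : (p.take j).length = j := by simp; omega
  constructor
  · rintro ⟨k, hk, he⟩
    have hLlen : (p.take j ++ x :: rest).length = j + 1 + rest.length := by
      simp [hTlen]; omega
    by_cases hkj : k < j
    · exfalso
      have h0 : p[0]'(by omega) = (p.take j ++ x :: rest)[k + 0]'(by omega) :=
        occ_elem he 0 (by omega) (by omega)
      have hk0 : (p.take j ++ x :: rest)[k + 0]'(by omega) = p[k] := by
        rw [List.getElem_append_left (by omega)]
        simp [List.getElem_take]
      have hk_eq : k = 0 := by
        have := List.Nodup.getElem_inj_iff hnd (i := 0) (hi := by omega)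
          (j := k) (hj := by omega)
        exact (this.mp (by rw [h0, hk0])).symm
      subst hk_eq
      have hj' : p[j] = (p.take j ++ x :: rest)[0 + j]'(by omega) :=
        occ_elem he j hj (by omega)
      simp only [Nat.zero_add] at hj'
      rw [List.getElem_append_right (by omega)] at hj'
      simp [hTlen] at hj'
      exact hx hj'.symm
    · refine ⟨k - j, ?_, ?_⟩
      · simp only [List.length_append, List.length_cons, hTlen] at hk
        simp only [List.length_cons]
        omega
      · have hdrop : (p.take j ++ x :: rest).drop k = (x :: rest).drop (k - j) := by
          rw [List.drop_append, List.drop_of_length_le (by omega), hTlen]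
          simp
        rw [← hdrop]
        exact he
  · rintro ⟨k, hk, he⟩
    refine ⟨j + k, ?_, ?_⟩
    · simp only [List.length_append, List.length_cons, hTlen]
      simp only [List.length_cons] at hk
      omega
    · rw [List.drop_append, List.drop_of_length_le (by omega), hTlen]
      simpa using he

-- an occurrence cannot start at a head ≠ p[0]
theorem occ_cons_of_ne_head (p : List Int) (hp : p ≠ []) (x : Int)
    (hx : x ≠ p[0]'(List.length_pos_of_ne_nil hp)) (rest : List Int) :
    Occ p (x :: rest) ↔ Occ p rest := by
  have hplen : 0 < p.length := List.length_pos_of_ne_nil hp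
  constructor
  · rintro ⟨k, hk, he⟩
    cases k with
    | zero =>
      exfalso
      have h0 : p[0] = (x :: rest)[0 + 0]'(by simp) := occ_elem he 0 hplen (by simp)
      exact hx (by simpa using h0.symm)
    | succ k' =>
      refine ⟨k', by simp at hk; omega, ?_⟩
      simpa using he
  · rintro ⟨k, hk, he⟩
    exact ⟨k + 1, by simp; omega, by simpa using he⟩

-- the loop invariant of B's scan: state j means "p.take j is virtually matched just before l"
theorem hosAux_iff_Occ (p : List Int) (hnd : p.Nodup) (l : List Int) :
    ∀ (j : Nat), j < p.length →
      (hosAux p (p.length : Int) (j : Int) l = true ↔ Occ p (p.take j ++ l)) := by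
  have hp : p ≠ [] → True := fun _ => trivial
  induction l with
  | nil =>
    intro j hj
    simp only [hosAux, List.append_nil]
    constructor
    · intro h; exact absurd h (by simp)
    · rintro ⟨k, hk, _⟩
      rw [List.length_take] at hk
      omega
  | cons x rest ih =>
    intro j hj
    have hget : PySem.List.pyGetD p (j : Int) 0 = p[j] := PySem.List.pyGetD_ofNat p j 0 hj
    have hget0 : PySem.List.pyGetD p (0 : Int) 0 = p[0]'(by omega) := by
      have := PySem.List.pyGetD_ofNat p 0 0 (by omega)
      simpa using this
    have htake : p.take j ++ [p[j]] = p.take (j + 1) := by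
      rw [List.take_add_one, List.getElem?_eq_getElem hj]
      rfl
    have hre : p.take j ++ p[j] :: rest = p.take (j + 1) ++ rest := by
      rw [← htake, List.append_assoc]
      rfl
    unfold hosAux
    rw [hget, hget0]
    by_cases hx : x = p[j]
    · rw [if_pos (by simpa using hx)]
      subst hx
      by_cases hm : j + 1 = p.length
      · rw [if_pos (by rw [beq_iff_eq]; exact_mod_cast hm)]
        simp only [true_iff]
        rw [hre, hm, List.take_length]
        refine ⟨0, by simp, ?_⟩
        simp
      · rw [if_neg (by rw [beq_iff_eq]; exact_mod_cast hm)]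
        rw [show ((j : Int) + 1) = ((j + 1 : Nat) : Int) from by push_cast; ring]
        rw [ih (j + 1) (by omega), hre]
    · rw [if_neg (by simpa using hx)]
      rw [occ_shift p hnd j hj x hx rest]
      by_cases hx0 : x = p[0]'(by omega)
      · rw [if_pos (by simpa using hx0)]
        have hj0 : j ≠ 0 := by
          intro h; subst h; exact hx hx0
        have h1lt : 1 < p.length := by omega
        rw [show ((1 : Int)) = ((1 : Nat) : Int) from by norm_num]
        rw [ih 1 h1lt]
        have : p.take 1 ++ rest = x :: rest := by
          rw [show (1 : Nat) = 0 + 1 from rfl, List.take_add_one,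
            List.getElem?_eq_getElem (by omega)]
          simp [hx0]
        rw [this]
      · rw [if_neg (by simpa using hx0)]
        rw [show ((0 : Int)) = ((0 : Nat) : Int) from by norm_num]
        rw [ih 0 (by omega)]
        simp only [List.take_zero, List.nil_append]
        exact (occ_cons_of_ne_head p (by intro h; subst h; simp at hj) x hx0 rest).symm

-- B's whole function is exactly Occ of the deduped pattern
theorem alt_iff_Occ (ord inp : List Int) :
    has_ordered_subset_alt ord inp = true ↔ Occ (PySem.List.dedup inp) ord := by
  unfold has_ordered_subset_alt
  simp only [PySem.List.len_eq]
  set q := PySem.List.dedup inp with hq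
  by_cases hnil : q = []
  · rw [if_pos (by simp [hnil])]
    simp only [true_iff]
    exact ⟨0, by simp [hnil], by simp [hnil]⟩
  · have hpos : 0 < q.length := List.length_pos_of_ne_nil hnil
    rw [if_neg (by simp [List.length_eq_zero_iff, hnil])]
    have hnd : q.Nodup := by rw [hq]; exact PySem.List.nodup_dedup inp
    have := hosAux_iff_Occ q hnd ord 0 hpos
    simpa using this

-- ===== VERDICT (by name: the statement is the Claim_ definition above) =====
theorem has_ordered_subset_spec : Claim_equal_has_ordered_subset := by
  intro order_arr input_list _
  unfold Spec_has_ordered_subset has_ordered_subset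
  have hded : input_list.foldl PySem.Set.add [] = PySem.List.dedup input_list := by
    rw [PySem.List.dedup_eq_ofList, PySem.Set.ofList_eq_foldl]
  rw [show (PySem.Set.empty : PySem.Set Int) = ([] : List Int) from rfl]
  simp only [hos_fold_pair input_list [], hded, PySem.List.len_eq]
  rw [Bool.eq_iff_iff]
  exact Iff.trans (hos_search_iff_Occ order_arr (PySem.List.dedup input_list))
    (alt_iff_Occ order_arr input_list).symm
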